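-- pv_equiv track=rewrite | github.com/sskeirik/dotfiles | utils/hradd.py | sum_times
-- ===== SOURCE A (Python) =====
-- def sum_times(times):
--     tot_hrs = 0
--     tot_mns = 0
--     for (hrs,mns) in times:
--         tot_hrs += hrs
--         tot_mns += mns
--     tot_hrs += tot_mns // 60
--     tot_mns = tot_mns % 60
--     return (tot_hrs,tot_mns)
-- ===== SOURCE B (Python) =====
-- def sum_times(times):
--     # Divide and conquer: recursively sum each half to an already-normalized
--     # (hours, minutes) pair (0 <= minutes < 60), carrying at every merge.
--     n = len(times)
--     if n == 0:
--         return (0, 0)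
--     if n == 1:
--         h, m = times[0]
--         return (h + m // 60, m % 60)
--     h1, m1 = sum_times(times[:n // 2])
--     h2, m2 = sum_times(times[n // 2:])
--     m = m1 + m2
--     return (h1 + h2 + m // 60, m % 60)
-- ===== Notes on version B (the rewrite author's own statement) =====
-- stated objective: alternative
-- what changed: Replaces the single accumulation loop with a divide-and-conquer recursion that halves the list and merges already-normalized (hours,minutes) pairs, carrying minutes into hours at every merge instead of once at the end.
import Mathlib
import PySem

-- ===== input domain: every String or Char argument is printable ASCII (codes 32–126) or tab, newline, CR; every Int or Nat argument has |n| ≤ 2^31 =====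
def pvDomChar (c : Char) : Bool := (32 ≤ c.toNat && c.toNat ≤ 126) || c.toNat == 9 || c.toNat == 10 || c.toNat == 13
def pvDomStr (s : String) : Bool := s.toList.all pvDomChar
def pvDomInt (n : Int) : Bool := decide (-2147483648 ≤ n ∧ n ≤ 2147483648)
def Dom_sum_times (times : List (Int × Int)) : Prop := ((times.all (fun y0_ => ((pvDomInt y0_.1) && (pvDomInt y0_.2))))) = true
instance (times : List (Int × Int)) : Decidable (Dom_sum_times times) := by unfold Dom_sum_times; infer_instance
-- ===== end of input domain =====

-- B replaces A's single accumulation loop by a divide-and-conquer recursion that merges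
-- already-normalized (hours, minutes) pairs, carrying at every merge ("alternative").

-- ===== PORT A =====
def sum_times (times : List (Int × Int)) : Int × Int :=
  let st := times.foldl (fun (s : Int × Int) (p : Int × Int) => (s.1 + p.1, s.2 + p.2)) (0, 0)
  (st.1 + PySem.Int.floordiv st.2 60, PySem.Int.mod st.2 60)

-- ===== PORT B =====
def sum_times_alt (times : List (Int × Int)) : Int × Int :=
  if _h0 : times.length = 0 then (0, 0)
  else if _h1 : times.length = 1 then
    match times with
    | p :: _ => (p.1 + PySem.Int.floordiv p.2 60, PySem.Int.mod p.2 60)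
    | [] => (0, 0)  -- unreachable (length = 1)
  else
    let k := times.length / 2
    let l := sum_times_alt (times.take k)
    let r := sum_times_alt (times.drop k)
    let m := l.2 + r.2
    (l.1 + r.1 + PySem.Int.floordiv m 60, PySem.Int.mod m 60)
termination_by times.length
decreasing_by
  · simp [List.length_take]; omega
  · simp [List.length_drop]; omega

-- ===== PRECONDITION & SPEC =====
def Spec_sum_times (times : List (Int × Int)) (out : Int × Int) : Prop := out = sum_times_alt times
instance (times : List (Int × Int)) (out : Int × Int) : Decidable (Spec_sum_times times out) := by unfold Spec_sum_times; infer_instance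

-- ===== CLAIM (what is proved, stated in full; the proofs are below) =====
def Claim_equal_sum_times : Prop := ∀ (times : List (Int × Int)), Dom_sum_times times → Spec_sum_times times (sum_times times)

-- ===== LEMMAS AND PROOFS =====

-- total minutes of a list of (h, m) pairs
def pvTM (l : List (Int × Int)) : Int := (l.map (fun p => p.1 * 60 + p.2)).sum

theorem pv_fold_char (times : List (Int × Int)) (a b : Int) :
    (times.foldl (fun (s : Int × Int) (p : Int × Int) => (s.1 + p.1, s.2 + p.2)) (a, b)).1 * 60
      + (times.foldl (fun (s : Int × Int) (p : Int × Int) => (s.1 + p.1, s.2 + p.2)) (a, b)).2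
      = a * 60 + b + pvTM times := by
  induction times generalizing a b with
  | nil => simp [pvTM]
  | cons hd tl ih =>
    simp only [List.foldl_cons, pvTM, List.map_cons, List.sum_cons]
    have := ih (a + hd.1) (b + hd.2)
    rw [this]; unfold pvTM; ring

theorem pv_alt_char (times : List (Int × Int)) :
    (sum_times_alt times).1 * 60 + (sum_times_alt times).2 = pvTM times
      ∧ 0 ≤ (sum_times_alt times).2 ∧ (sum_times_alt times).2 < 60 := by
  fun_induction sum_times_alt times
  case case1 ts h =>
    have : ts = [] := List.eq_nil_of_length_eq_zero h
    subst this; simp [pvTM]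
  case case2 p tl hA hB hC hD =>
    have h60 : (0:Int) < 60 := by norm_num
    have htl : tl = [] := by simpa using hD
    subst htl
    rw [PySem.Int.floordiv_eq_ediv_of_pos h60, PySem.Int.mod_eq_emod_of_pos h60]
    refine ⟨?_, ?_, ?_⟩ <;> simp [pvTM] <;> omega
  case case3 hA hB hC hD => simp at hD
  case case4 ts hA hB k l r m ihT ihD =>
    have h60 : (0:Int) < 60 := by norm_num
    have hsplit : pvTM (ts.take k) + pvTM (ts.drop k) = pvTM ts := by
      unfold pvTM
      rw [← List.sum_append, ← List.map_append, List.take_append_drop]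
    obtain ⟨hl1, hl2, hl3⟩ := ihT
    obtain ⟨hr1, hr2, hr3⟩ := ihD
    rw [PySem.Int.floordiv_eq_ediv_of_pos h60, PySem.Int.mod_eq_emod_of_pos h60]
    dsimp only [m, l, r]
    refine ⟨?_, ?_, ?_⟩ <;> omega

theorem sum_times_spec : Claim_equal_sum_times := by
  intro times _
  unfold Spec_sum_times sum_times
  dsimp only
  set st := times.foldl (fun (s : Int × Int) (p : Int × Int) => (s.1 + p.1, s.2 + p.2)) ((0:Int), (0:Int)) with hst
  have hA : st.1 * 60 + st.2 = pvTM times := by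
    have := pv_fold_char times 0 0
    simpa using this
  obtain ⟨hB, hB0, hB60⟩ := pv_alt_char times
  have h60 : (0:Int) < 60 := by norm_num
  rw [PySem.Int.floordiv_eq_ediv_of_pos h60, PySem.Int.mod_eq_emod_of_pos h60]
  refine Prod.ext ?_ ?_ <;> dsimp only <;> omega
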